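-- pv_equiv track=rewrite | github.com/axiomantic/spellbook | hooks/spellbook_hook.py | _apply_memory_budget
-- ===== SOURCE A (Python) =====
-- MEMORY_BUDGET_MAX_COUNT = 5
--
-- MEMORY_BUDGET_MAX_TOKENS = 500
--
-- def _apply_memory_budget(
--     memories: list[dict],
--     max_count: int = MEMORY_BUDGET_MAX_COUNT,
--     max_tokens: int = MEMORY_BUDGET_MAX_TOKENS,
-- ) -> list[dict]:
--     """Cap a memory list by count and cumulative token estimate.
--
--     Token estimate: len(body) // 4 per memory. Stops before adding a memory
--     that would push cumulative tokens above max_tokens.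
--     """
--     out: list[dict] = []
--     total = 0
--     for m in memories:
--         if len(out) >= max_count:
--             break
--         body = m.get("body", "") or ""
--         cost = len(body) // 4
--         if total + cost > max_tokens:
--             break
--         out.append(m)
--         total += cost
--     return out
-- ===== SOURCE B (Python) =====
-- def _apply_memory_budget(memories, max_count=5, max_tokens=500):
--     cands = memories[:max(0, max_count)]
--     costs = [len(m.get("body", "") or "") // 4 for m in cands]
--     cums = [sum(costs[:i + 1]) for i in range(len(cands))]
--     cut = next((i for i, c in enumerate(cums) if c > max_tokens), len(cands))
--     return cands[:cut]
-- ===== Notes on version B (the rewrite author's own statement) =====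
-- stated objective: alternative
-- what changed: Replaces the fused accumulate-and-break loop with a table decomposition: slice the first max(0,max_count) candidates, build a per-memory cost list and a prefix-sum table, locate the first cumulative sum exceeding max_tokens, and return the candidates sliced at that cutoff.
import Mathlib
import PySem

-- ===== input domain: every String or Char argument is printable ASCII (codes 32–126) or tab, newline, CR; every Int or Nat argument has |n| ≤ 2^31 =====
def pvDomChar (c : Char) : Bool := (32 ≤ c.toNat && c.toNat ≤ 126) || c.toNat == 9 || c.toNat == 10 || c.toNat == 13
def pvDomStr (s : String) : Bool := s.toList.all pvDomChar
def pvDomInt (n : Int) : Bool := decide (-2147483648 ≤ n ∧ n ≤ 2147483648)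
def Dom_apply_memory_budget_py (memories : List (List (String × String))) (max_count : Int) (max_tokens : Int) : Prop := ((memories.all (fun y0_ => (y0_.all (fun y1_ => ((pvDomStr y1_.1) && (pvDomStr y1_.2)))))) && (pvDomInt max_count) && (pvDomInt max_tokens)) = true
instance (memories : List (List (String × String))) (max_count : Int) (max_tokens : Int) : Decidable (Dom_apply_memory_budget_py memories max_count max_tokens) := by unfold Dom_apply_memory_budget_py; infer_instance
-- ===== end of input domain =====

-- B replaces A's fused accumulate-and-break loop by a table decomposition (candidate slice,
-- cost list, prefix-sum table, first-overflow cutoff); objective: alternative (same result,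
-- genuinely different structure).

-- ===== PORT A =====

-- m.get("body", "") or "": first-match association lookup with "" default ('or ""' is the
-- identity on strings, since the only falsy str is "" itself)
def pvBody (m : List (String × String)) : String :=
  match m.find? (fun p => p.1 == "body") with
  | some p => p.2
  | none => ""

-- len(body) // 4
def pvCost (m : List (String × String)) : Int :=
  PySem.Int.floordiv (PySem.Str.len (pvBody m)) 4

-- the for-loop of A with its state (out, total); break = return out
def pvLoopA (max_count max_tokens : Int) :
    List (List (String × String)) → List (List (String × String)) → Int →
    List (List (String × String))
  | [], out, _ => out
  | m :: rest, out, total =>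
    if (out.length : Int) ≥ max_count then out
    else if total + pvCost m > max_tokens then out
    else pvLoopA max_count max_tokens rest (out ++ [m]) (total + pvCost m)

def apply_memory_budget_py (memories : List (List (String × String))) (max_count : Int) (max_tokens : Int) : List (List (String × String)) :=
  pvLoopA max_count max_tokens memories [] 0

-- ===== PORT B =====
def apply_memory_budget_py_alt (memories : List (List (String × String))) (max_count : Int) (max_tokens : Int) : List (List (String × String)) :=
  let cands := memories.take (max 0 max_count).toNat          -- memories[:max(0, max_count)]
  let costs := cands.map pvCost                                -- per-memory cost list
  let cums := (List.range cands.length).map (fun i => (costs.take (i + 1)).sum)  -- prefix sums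
  let cut := (cums.findIdx? (fun c => decide (c > max_tokens))).getD cands.length -- next(…, len)
  cands.take cut

-- ===== PRECONDITION & SPEC =====
def Spec_apply_memory_budget_py (memories : List (List (String × String))) (max_count : Int) (max_tokens : Int) (out : List (List (String × String))) : Prop := out = apply_memory_budget_py_alt memories max_count max_tokens
instance (memories : List (List (String × String))) (max_count : Int) (max_tokens : Int) (out : List (List (String × String))) : Decidable (Spec_apply_memory_budget_py memories max_count max_tokens out) := by unfold Spec_apply_memory_budget_py; infer_instance

-- ===== CLAIM (what is proved, stated in full; the proofs are below) =====
def Claim_equal_apply_memory_budget_py : Prop := ∀ (memories : List (List (String × String))) (max_count : Int) (max_tokens : Int), Dom_apply_memory_budget_py memories max_count max_tokens → Spec_apply_memory_budget_py memories max_count max_tokens (apply_memory_budget_py memories max_count max_tokens)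

-- ===== LEMMAS AND PROOFS =====

-- common reference: greedy selection limited by a remaining count and a remaining budget
def pvSel : List (List (String × String)) → Int → Int → List (List (String × String))
  | [], _, _ => []
  | m :: rest, k, bud =>
    if k ≤ 0 then []
    else if pvCost m > bud then []
    else m :: pvSel rest (k - 1) (bud - pvCost m)

-- greedy selection with the count already applied by truncation
def pvSel2 : List (List (String × String)) → Int → List (List (String × String))
  | [], _ => []
  | m :: rest, bud =>
    if pvCost m > bud then [] else m :: pvSel2 rest (bud - pvCost m)

theorem pvLoopA_eq_sel (max_count max_tokens : Int) :
    ∀ (l out : List (List (String × String))) (total : Int),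
    pvLoopA max_count max_tokens l out total
      = out ++ pvSel l (max_count - out.length) (max_tokens - total) := by
  intro l
  induction l with
  | nil => intro out total; simp [pvLoopA, pvSel]
  | cons m rest ih =>
    intro out total
    by_cases h1 : (out.length : Int) ≥ max_count
    · rw [pvLoopA, if_pos h1, pvSel, if_pos (by omega)]; simp
    · by_cases h2 : total + pvCost m > max_tokens
      · rw [pvLoopA, if_neg h1, if_pos h2, pvSel, if_neg (by omega), if_pos (by omega)]; simp
      · rw [pvLoopA, if_neg h1, if_neg h2, pvSel, if_neg (by omega), if_neg (by omega), ih]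
        have e1 : max_count - (((out ++ [m]).length : Nat) : Int)
            = max_count - (out.length : Int) - 1 := by
          simp only [List.length_append, List.length_cons, List.length_nil]; push_cast; ring
        have e2 : max_tokens - (total + pvCost m) = max_tokens - total - pvCost m := by ring
        rw [e1, e2]; simp

theorem pvSel_eq_sel2_take :
    ∀ (l : List (List (String × String))) (k bud : Int),
    pvSel l k bud = pvSel2 (l.take (max 0 k).toNat) bud := by
  intro l
  induction l with
  | nil => intro k bud; simp [pvSel, pvSel2]
  | cons m rest ih =>
    intro k bud
    by_cases hk : k ≤ 0
    · rw [pvSel, if_pos hk]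
      have : (max 0 k).toNat = 0 := by omega
      simp [this, pvSel2]
    · have : (max 0 k).toNat = (max 0 (k - 1)).toNat + 1 := by omega
      rw [pvSel, if_neg hk, this, List.take_succ_cons, pvSel2]
      by_cases h2 : pvCost m > bud
      · rw [if_pos h2, if_pos h2]
      · rw [if_neg h2, if_neg h2, ih]

theorem pvTable_eq_sel2 :
    ∀ (l : List (List (String × String))) (bud : Int),
    l.take ((((List.range l.length).map (fun i => ((l.map pvCost).take (i + 1)).sum)).findIdx?
        (fun c => decide (c > bud))).getD l.length) = pvSel2 l bud := by
  intro l
  induction l with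
  | nil => intro bud; simp [pvSel2]
  | cons m rest ih =>
    intro bud
    have hcums : (List.range (m :: rest).length).map
        (fun i => (((m :: rest).map pvCost).take (i + 1)).sum)
        = pvCost m :: ((List.range rest.length).map
            (fun i => ((rest.map pvCost).take (i + 1)).sum)).map (fun x => pvCost m + x) := by
      simp only [List.length_cons, List.range_succ_eq_map, List.map_cons, List.map_map]
      have hh : (List.take (0 + 1) (pvCost m :: List.map pvCost rest)).sum = pvCost m := by simp
      rw [hh]
      refine congrArg (List.cons (pvCost m)) ?_
      apply List.map_congr_left
      intro i _
      simp [Function.comp, List.take_succ_cons]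
    rw [hcums, List.findIdx?_cons]
    by_cases h2 : pvCost m > bud
    · simp only [h2, decide_true, if_true, Option.getD_some, List.take_zero]
      rw [pvSel2, if_pos h2]
    · simp only [h2, decide_false]
      have hpred : (fun c => decide (c > bud)) ∘ (fun x => pvCost m + x)
          = (fun c => decide (c > bud - pvCost m)) := by
        funext x
        simp only [Function.comp]
        exact decide_eq_decide.mpr (by omega)
      rw [List.findIdx?_map, hpred]
      rw [pvSel2, if_neg h2, ← ih (bud - pvCost m)]
      cases hfi : ((List.range rest.length).map
          (fun i => ((rest.map pvCost).take (i + 1)).sum)).findIdx?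
          (fun c => decide (c > bud - pvCost m)) with
      | none => simp [List.take_succ_cons]
      | some j => simp [List.take_succ_cons]

-- ===== VERDICT (by name: the statement is the Claim_ definition above) =====
theorem apply_memory_budget_py_spec : Claim_equal_apply_memory_budget_py := by
  intro memories max_count max_tokens _
  unfold Spec_apply_memory_budget_py apply_memory_budget_py apply_memory_budget_py_alt
  rw [pvLoopA_eq_sel, pvTable_eq_sel2]
  simpa using pvSel_eq_sel2_take memories max_count max_tokens
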